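-- pv_equiv track=rewrite | github.com/rogive/150-algorithm-challenge | src/mini_max_sum/index.py | miniMaxSum
-- ===== SOURCE A (Python) =====
-- def miniMaxSum(arr) :
--   respuesta = [0, 0]
--   for i in range(len(arr)) :
--       if(i < 4) :
--         respuesta[0] += arr[i]
--       if(i >= len(arr) - 4) :
--         respuesta[1] += arr[i]
--   return respuesta
-- ===== SOURCE B (Python) =====
-- def miniMaxSum(arr):
--     first = 0
--     count = 0
--     window = []
--     for x in arr:
--         if count < 4:
--             first += x
--             count += 1
--         window.append(x)
--         if len(window) > 4:
--             window.pop(0)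
--     return [first, sum(window)]
-- ===== Notes on version B (the rewrite author's own statement) =====
-- stated objective: alternative
-- what changed: Replaced the index-based scan with two length-relative conditionals by a single forward pass maintaining a capped-count head accumulator and a sliding window of the last up-to-4 elements, never consulting len(arr) or indices.
import Mathlib
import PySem

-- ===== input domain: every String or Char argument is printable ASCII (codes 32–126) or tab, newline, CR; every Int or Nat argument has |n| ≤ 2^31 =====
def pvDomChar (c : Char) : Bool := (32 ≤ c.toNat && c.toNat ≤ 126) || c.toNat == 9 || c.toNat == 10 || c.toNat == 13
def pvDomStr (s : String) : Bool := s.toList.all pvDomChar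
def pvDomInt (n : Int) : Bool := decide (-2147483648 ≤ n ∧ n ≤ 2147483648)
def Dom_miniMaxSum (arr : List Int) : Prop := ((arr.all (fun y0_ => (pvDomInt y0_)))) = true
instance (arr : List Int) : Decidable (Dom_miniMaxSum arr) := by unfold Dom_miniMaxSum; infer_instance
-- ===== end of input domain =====

-- B replaces A's len(arr)-relative index scan by one forward pass with a capped head
-- accumulator and a sliding window of the last up-to-4 elements (alternative, same cost).

-- ===== PORT A =====
-- respuesta = [0,0]; for i in range(len(arr)): if i < 4: respuesta[0] += arr[i]; if i >= len(arr)-4: respuesta[1] += arr[i]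
def miniMaxSum (arr : List Int) : List Int :=
  let n : Int := PySem.List.len arr
  let respuesta : Int × Int :=
    (PySem.List.pyRange 0 n 1).foldl
      (fun (r : Int × Int) i =>
        ((if i < 4 then r.1 + PySem.List.pyGetD arr i 0 else r.1),
         (if n - 4 ≤ i then r.2 + PySem.List.pyGetD arr i 0 else r.2)))
      (0, 0)
  [respuesta.1, respuesta.2]

-- ===== PORT B =====
-- first=0; count=0; window=[]; for x in arr: if count<4: first+=x; count+=1;
--   window.append(x); if len(window)>4: window.pop(0);  return [first, sum(window)]
def miniMaxSum_alt (arr : List Int) : List Int :=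
  let s : Int × Int × List Int :=
    arr.foldl
      (fun (s : Int × Int × List Int) x =>
        let first := if s.2.1 < 4 then s.1 + x else s.1
        let count := if s.2.1 < 4 then s.2.1 + 1 else s.2.1
        let w := s.2.2 ++ [x]
        let w := if 4 < (w.length : Int) then w.tail else w
        (first, count, w))
      (0, 0, [])
  [s.1, s.2.2.sum]

-- ===== PRECONDITION & SPEC =====
def Spec_miniMaxSum (arr : List Int) (out : List Int) : Prop := out = miniMaxSum_alt arr
instance (arr : List Int) (out : List Int) : Decidable (Spec_miniMaxSum arr out) := by unfold Spec_miniMaxSum; infer_instance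

-- ===== CLAIM (what is proved, stated in full; the proofs are below) =====
def Claim_equal_miniMaxSum : Prop := ∀ (arr : List Int), Dom_miniMaxSum arr → Spec_miniMaxSum arr (miniMaxSum arr)

-- ===== LEMMAS AND PROOFS =====

-- folding with an accumulator-preserving step is the identity
theorem foldl_skip {α β : Type} (l : List α) (init : β) :
    l.foldl (fun a _ => a) init = init := by
  induction l with
  | nil => rfl
  | cons x xs ih => simp only [List.foldl_cons]; exact ih

-- the first min 4 n indices, read through pyGetD, are exactly take 4
theorem map_pyGetD_head (arr : List Int) :
    (PySem.List.pyRange 0 (min 4 (arr.length : Int)) 1).map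
      (fun j => PySem.List.pyGetD arr j 0) = arr.take 4 := by
  apply List.ext_getElem
  · simp [PySem.List.length_pyRange_one]
    omega
  · intro k h1 h2
    simp only [List.getElem_map]
    rw [PySem.List.getElem_pyRange_one]
    have hk : (k : Int) < (arr.length : Int) := by
      simp [PySem.List.length_pyRange_one] at h1
      omega
    rw [show (0 : Int) + (k : Int) = (k : Int) by ring]
    rw [PySem.List.pyGetD_eq_getElem arr 0 (by positivity) hk]
    simp [List.getElem_take]

-- the pair-state fold of port A splits into two independent scalar folds
theorem foldl_pair_split (arr : List Int) (c : Int) (l : List Int) (a b : Int) :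
    l.foldl (fun (r : Int × Int) i =>
        ((if i < 4 then r.1 + PySem.List.pyGetD arr i 0 else r.1),
         (if c ≤ i then r.2 + PySem.List.pyGetD arr i 0 else r.2))) (a, b)
    = (l.foldl (fun s i => if i < 4 then s + PySem.List.pyGetD arr i 0 else s) a,
       l.foldl (fun s i => if c ≤ i then s + PySem.List.pyGetD arr i 0 else s) b) := by
  induction l generalizing a b with
  | nil => rfl
  | cons x xs ih => simp only [List.foldl_cons]; rw [ih]

-- invariant of B's single pass: after processing prefix p the state is
-- (sum of first 4 of p, min |p| 4, last up-to-4 elements of p)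
theorem alt_fold_inv (p : List Int) :
    p.foldl
      (fun (s : Int × Int × List Int) x =>
        let first := if s.2.1 < 4 then s.1 + x else s.1
        let count := if s.2.1 < 4 then s.2.1 + 1 else s.2.1
        let w := s.2.2 ++ [x]
        let w := if 4 < (w.length : Int) then w.tail else w
        (first, count, w))
      (0, 0, [])
    = ((p.take 4).sum, (min (p.length : Int) 4), p.drop (p.length - 4)) := by
  induction p using List.reverseRecOn with
  | nil => rfl
  | append_singleton q x ih =>
    rw [List.foldl_append, ih]
    simp only [List.foldl_cons, List.foldl_nil]
    have hlw : (q.drop (q.length - 4) ++ [x]).length = (q.length - (q.length - 4)) + 1 := by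
      simp [List.length_drop]
    by_cases h : q.length < 4
    · have hc : min ((q.length : Int)) 4 < 4 := by omega
      have hw : ¬ 4 < ((q.drop (q.length - 4) ++ [x]).length : Int) := by
        rw [hlw]; push_cast; omega
      simp only [hc, hw, if_pos, if_neg, not_false_iff]
      refine congrArg₂ _ ?_ (congrArg₂ _ ?_ ?_)
      · rw [List.take_of_length_le (by omega), List.take_of_length_le (by simp; omega)]
        simp
      · simp; omega
      · rw [Nat.sub_eq_zero_of_le (by omega), Nat.sub_eq_zero_of_le (by simp; omega)]
        simp
    · have hc : ¬ min ((q.length : Int)) 4 < 4 := by omega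
      have hw : 4 < ((q.drop (q.length - 4) ++ [x]).length : Int) := by
        rw [hlw]; push_cast; omega
      simp only [hc, hw, if_pos, if_neg, not_false_iff]
      refine congrArg₂ _ ?_ (congrArg₂ _ ?_ ?_)
      · rw [List.take_append_of_le_length (by omega)]
      · simp; omega
      · have h1 : (q ++ [x]).length - 4 = (q.length - 4) + 1 := by simp; omega
        rw [h1, List.drop_append_of_le_length (by omega), ← List.drop_drop, List.drop_one]
        have hne : q.drop (q.length - 4) ≠ [] := by
          intro hnil
          have := congrArg List.length hnil
          simp [List.length_drop] at this
          omega
        rw [List.tail_append_of_ne_nil hne]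

theorem miniMaxSum_eq_alt (arr : List Int) : miniMaxSum arr = miniMaxSum_alt arr := by
  show [((PySem.List.pyRange 0 (((arr.length : Int))) 1).foldl
          (fun (r : Int × Int) i =>
            ((if i < 4 then r.1 + PySem.List.pyGetD arr i 0 else r.1),
             (if ((arr.length : Int)) - 4 ≤ i then r.2 + PySem.List.pyGetD arr i 0 else r.2)))
          (0, 0)).1,
        ((PySem.List.pyRange 0 (((arr.length : Int))) 1).foldl
          (fun (r : Int × Int) i =>
            ((if i < 4 then r.1 + PySem.List.pyGetD arr i 0 else r.1),
             (if ((arr.length : Int)) - 4 ≤ i then r.2 + PySem.List.pyGetD arr i 0 else r.2)))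
          (0, 0)).2]
      = miniMaxSum_alt arr
  rw [foldl_pair_split]
  have h1 : (PySem.List.pyRange 0 ((arr.length : Int)) 1).foldl
      (fun a i => if i < 4 then a + PySem.List.pyGetD arr i 0 else a) 0
      = (arr.take 4).sum := by
    rw [PySem.List.pyRange_one_append 0 (min 4 (arr.length : Int)) (arr.length : Int) (by positivity) (by omega),
        List.foldl_append]
    rw [PySem.List.foldl_congr_mem
          (PySem.List.pyRange (min 4 (arr.length : Int)) ((arr.length : Int)) 1) _ (fun a _ => a) _
        (by intro a i hi
            rw [PySem.List.mem_pyRange_one] at hi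
            simp [show ¬ i < 4 by omega])]
    rw [foldl_skip]
    rw [PySem.List.foldl_congr_mem
          (PySem.List.pyRange 0 (min 4 (arr.length : Int)) 1) _ (fun a i => a + PySem.List.pyGetD arr i 0) _
        (by intro a i hi
            rw [PySem.List.mem_pyRange_one] at hi
            simp [show i < 4 by omega])]
    rw [PySem.List.foldl_add, map_pyGetD_head]
    ring
  have h2 : (PySem.List.pyRange 0 ((arr.length : Int)) 1).foldl
      (fun a i => if (arr.length : Int) - 4 ≤ i then a + PySem.List.pyGetD arr i 0 else a) 0
      = (arr.drop (arr.length - 4)).sum := by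
    rw [PySem.List.pyRange_one_append 0 (max 0 ((arr.length : Int) - 4)) (arr.length : Int) (by positivity) (by omega),
        List.foldl_append]
    rw [PySem.List.foldl_congr_mem
          (PySem.List.pyRange (max 0 ((arr.length : Int) - 4)) ((arr.length : Int)) 1) _
          (fun a i => a + PySem.List.pyGetD arr i 0) _
        (by intro a i hi
            rw [PySem.List.mem_pyRange_one] at hi
            simp [show (arr.length : Int) - 4 ≤ i by omega])]
    rw [PySem.List.foldl_add]
    rw [PySem.List.foldl_congr_mem
          (PySem.List.pyRange 0 (max 0 ((arr.length : Int) - 4)) 1) _ (fun a _ => a) _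
        (by intro a i hi
            rw [PySem.List.mem_pyRange_one] at hi
            simp [show ¬ (arr.length : Int) - 4 ≤ i by omega])]
    rw [foldl_skip]
    have := PySem.List.map_pyGetD_pyRange arr 0 (a := max 0 ((arr.length : Int) - 4)) (by positivity)
    rw [PySem.List.len_eq] at this
    rw [this]
    have ht : (max 0 ((arr.length : Int) - 4)).toNat = arr.length - 4 := by omega
    simp [ht]
  rw [h1, h2]
  have halt : miniMaxSum_alt arr = [(arr.take 4).sum, (arr.drop (arr.length - 4)).sum] := by
    unfold miniMaxSum_alt
    rw [alt_fold_inv]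
  rw [halt]

-- ===== VERDICT (by name: the statement is the Claim_ definition above) =====
theorem miniMaxSum_spec : Claim_equal_miniMaxSum := by
  intro arr _
  exact miniMaxSum_eq_alt arr
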